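-- pv_equiv track=rewrite | github.com/younghun1124/baekjoon | algo_traveler_1612.py | dfs_path
-- ===== SOURCE A (Python) =====
-- def dfs_path(mst_edges, n, start):
--     # MST를 그래프로 변환
--     graph = [[] for _ in range(n)]
--     for cost, u, v in mst_edges:
--         graph[u].append((cost, v))
--         graph[v].append((cost, u))
--
--     # DFS로 방문 경로 생성
--     visited = [False] * n
--     path = []
--
--     def dfs(node):
--         visited[node] = True
--         path.append(node)
--         for cost, neighbor in sorted(graph[node]):
--             if not visited[neighbor]:
--                 dfs(neighbor)
--
--     dfs(start)
--     path.append(start)  # 시작점으로 돌아옴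
--     return path
-- ===== SOURCE B (Python) =====
-- def dfs_path(mst_edges, n, start):
--     # Same adjacency list, but iterative DFS with an explicit stack
--     # (check-on-pop, neighbors pushed in reversed sorted order).
--     graph = [[] for _ in range(n)]
--     for cost, u, v in mst_edges:
--         graph[u].append((cost, v))
--         graph[v].append((cost, u))
--
--     visited = [False] * n
--     path = []
--     stack = [start]
--     while stack:
--         node = stack.pop()
--         if visited[node]:
--             continue
--         visited[node] = True
--         path.append(node)
--         for cost, neighbor in reversed(sorted(graph[node])):
--             stack.append(neighbor)
--
--     path.append(start)
--     return path
-- ===== Notes on version B (the rewrite author's own statement) =====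
-- stated objective: alternative
-- what changed: The recursive DFS over the adjacency list is replaced by an iterative DFS with an explicit stack (check-on-pop, neighbors pushed in reversed sorted order), which also avoids Python's recursion limit on deep paths.
import Mathlib
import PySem

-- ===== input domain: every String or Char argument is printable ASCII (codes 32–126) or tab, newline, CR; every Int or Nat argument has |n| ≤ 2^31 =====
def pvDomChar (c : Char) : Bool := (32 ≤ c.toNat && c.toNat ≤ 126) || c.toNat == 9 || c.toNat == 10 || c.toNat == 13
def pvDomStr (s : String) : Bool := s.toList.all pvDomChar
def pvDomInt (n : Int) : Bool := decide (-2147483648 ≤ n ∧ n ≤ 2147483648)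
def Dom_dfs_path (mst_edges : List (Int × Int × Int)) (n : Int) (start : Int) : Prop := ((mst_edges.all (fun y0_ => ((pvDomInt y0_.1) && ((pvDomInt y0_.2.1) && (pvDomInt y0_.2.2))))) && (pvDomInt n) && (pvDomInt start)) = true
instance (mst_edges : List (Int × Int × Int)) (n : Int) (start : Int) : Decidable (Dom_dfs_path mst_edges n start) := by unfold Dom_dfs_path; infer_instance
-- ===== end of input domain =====

-- B replaces A's recursive DFS by an iterative DFS with an explicit stack (check-on-pop,
-- neighbors pushed in reversed sorted order); same adjacency list, same return value.

-- ===== PORT A =====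
-- shared helpers (both Pythons build the graph and read/mark `visited` with the same code)

-- visited[i] (Python raises IndexError out of range: outside Pre_; the default is irrelevant there)
def pvVGet (v : List Bool) (i : Int) : Bool := PySem.List.pyGetD v i true

-- visited[i] = True
def pvVSet (v : List Bool) (i : Int) : List Bool := PySem.List.pySetD v i true

-- graph[i].append(e)
def pvAdjAppend (g : List (List (Int × Int))) (i : Int) (e : Int × Int) : List (List (Int × Int)) :=
  PySem.List.pySetD g i (PySem.List.pyGetD g i [] ++ [e])

-- graph = [[] for _ in range(n)]; for cost, u, v in mst_edges: graph[u].append((cost,v)); graph[v].append((cost,u))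
def pvBuildGraph (mst_edges : List (Int × Int × Int)) (n : Int) : List (List (Int × Int)) :=
  mst_edges.foldl
    (fun g e => pvAdjAppend (pvAdjAppend g e.2.1 (e.1, e.2.2)) e.2.2 (e.1, e.2.1))
    (List.replicate n.toNat [])

-- sorted(graph[node])  (Python sorts the (cost, neighbor) pairs lexicographically)
def pvNbrs (g : List (List (Int × Int))) (node : Int) : List (Int × Int) :=
  PySem.List.sorted2 (PySem.List.pyGetD g node []) Prod.fst Prod.snd

-- number of False entries of `visited` (termination measure / fuel bound)
def pvCF (v : List Bool) : Nat := v.countP (fun b => !b)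

-- A's recursive dfs, with fuel (recursion depth is at most pvCF visited, see the proofs below;
-- the fuel guard only makes the same computation total)
mutual
def pvDfsA (g : List (List (Int × Int))) : Nat → List Bool → List Int → Int → List Bool × List Int
  | 0, v, p, _ => (v, p)
  | f+1, v, p, node => pvFoldA g f (pvNbrs g node) (pvVSet v node) (p ++ [node])
  termination_by f _ _ _ => (f, 0)

def pvFoldA (g : List (List (Int × Int))) : Nat → List (Int × Int) → List Bool → List Int → List Bool × List Int
  | _, [], v, p => (v, p)
  | f, cn :: L, v, p =>
    if pvVGet v cn.2 then pvFoldA g f L v p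
    else
      let r := pvDfsA g f v p cn.2
      pvFoldA g f L r.1 r.2
  termination_by f L _ _ => (f, L.length + 1)
end

def dfs_path (mst_edges : List (Int × Int × Int)) (n : Int) (start : Int) : List Int :=
  let g := pvBuildGraph mst_edges n
  let v0 := List.replicate n.toNat false
  let r := pvDfsA g (n.toNat + 1) v0 [] start
  r.2 ++ [start]

-- ===== PORT B =====
-- decreasing lemma for the stack loop (stated before the port so the port can cite it)
theorem pvVGet_false_elim (v : List Bool) (i : Int) (h : pvVGet v i = false) :
    ∃ k, PySem.List.pyIdx? v.length i = some k ∧ ∃ hk : k < v.length,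
      v[k] = false ∧ pvVSet v i = v.set k true := by
  unfold pvVGet pvVSet PySem.List.pyGetD PySem.List.pyGet? at *
  cases hidx : PySem.List.pyIdx? v.length i with
  | none => rw [hidx] at h; simp at h
  | some k =>
    rw [hidx] at h
    simp only [Option.bind] at h
    cases hv : v[k]? with
    | none => rw [hv] at h; simp at h
    | some b =>
      rw [hv] at h; simp at h
      have hk : k < v.length := List.getElem?_eq_some_iff.mp hv |>.1
      refine ⟨k, rfl, hk, ?_, ?_⟩
      · have := List.getElem?_eq_getElem hk
        rw [hv] at this; cases this; exact h
      · simp [PySem.List.pySetD, PySem.List.pySet?, hidx]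

theorem pvCF_vset_lt (v : List Bool) (i : Int) (h : pvVGet v i = false) :
    pvCF (pvVSet v i) < pvCF v := by
  obtain ⟨k, -, hk, hval, hset⟩ := pvVGet_false_elim v i h
  rw [hset]
  unfold pvCF
  rw [List.countP_set hk]
  simp [hval]
  exact hval ▸ List.getElem_mem hk

-- while stack: node = stack.pop(); …   (stack top at the head; push = cons)
def pvStackB (g : List (List (Int × Int))) : List Bool → List Int → List Int → List Bool × List Int
  | v, p, [] => (v, p)
  | v, p, node :: st =>
    if _h : pvVGet v node then pvStackB g v p st
    else
      pvStackB g (pvVSet v node) (p ++ [node])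
        ((pvNbrs g node).reverse.foldl (fun s cn => cn.2 :: s) st)
  termination_by v _ st => (pvCF v, st.length)
  decreasing_by
  · exact Prod.Lex.right _ (Nat.lt_succ_self _)
  · exact Prod.Lex.left _ _ (pvCF_vset_lt v node (by simpa using _h))

def dfs_path_alt (mst_edges : List (Int × Int × Int)) (n : Int) (start : Int) : List Int :=
  let g := pvBuildGraph mst_edges n
  let v0 := List.replicate n.toNat false
  let r := pvStackB g v0 [] [start]
  r.2 ++ [start]

-- ===== PRECONDITION & SPEC =====
-- Pre_: exactly the inputs where Python A raises no IndexError: every edge endpoint and the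
-- start node are valid (possibly negative, Python-style) indices into the n node slots.
def Pre_dfs_path (mst_edges : List (Int × Int × Int)) (n : Int) (start : Int) : Prop :=
  (∀ e ∈ mst_edges, PySem.Raise.InRange n.toNat e.2.1 ∧ PySem.Raise.InRange n.toNat e.2.2) ∧
  PySem.Raise.InRange n.toNat start

instance (mst_edges : List (Int × Int × Int)) (n : Int) (start : Int) : Decidable (Pre_dfs_path mst_edges n start) := by
  unfold Pre_dfs_path; infer_instance

def pvWitness_dfs_path : (List (Int × Int × Int)) × Int × Int := ([(5, 0, 1), (3, 1, 2)], 3, 0)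

def Spec_dfs_path (mst_edges : List (Int × Int × Int)) (n : Int) (start : Int) (out : List Int) : Prop := out = dfs_path_alt mst_edges n start
instance (mst_edges : List (Int × Int × Int)) (n : Int) (start : Int) (out : List Int) : Decidable (Spec_dfs_path mst_edges n start out) := by unfold Spec_dfs_path; infer_instance

-- ===== CLAIM (what is proved, stated in full; the proofs are below) =====
def Claim_equal_dfs_path : Prop := ∀ (mst_edges : List (Int × Int × Int)) (n : Int) (start : Int), Dom_dfs_path mst_edges n start → Pre_dfs_path mst_edges n start → Spec_dfs_path mst_edges n start (dfs_path mst_edges n start)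

-- ===== LEMMAS AND PROOFS =====

theorem pvCF_vset_le (v : List Bool) (i : Int) : pvCF (pvVSet v i) ≤ pvCF v := by
  by_cases h : pvVGet v i = false
  · exact Nat.le_of_lt (pvCF_vset_lt v i h)
  · -- i out of range or already visited: the set is a no-op on the count
    unfold pvVSet PySem.List.pySetD PySem.List.pySet?
    cases hidx : PySem.List.pyIdx? v.length i with
    | none => simp
    | some k =>
      by_cases hk : k < v.length
      · have hval : v[k] = true := by
          unfold pvVGet PySem.List.pyGetD PySem.List.pyGet? at h
          rw [hidx] at h
          simp [List.getElem?_eq_getElem hk] at h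
          simpa using h
        simp only [Option.map_some, Option.getD_some]
        unfold pvCF
        rw [List.countP_set hk]
        simp [hval]
      · simp [List.set_eq_of_length_le (Nat.le_of_not_lt hk)]

-- the push loop of B prepends the neighbor ids in sorted order
theorem pvPush_eq (L : List (Int × Int)) (st : List Int) :
    L.reverse.foldl (fun s cn => cn.2 :: s) st = L.map Prod.snd ++ st := by
  induction L generalizing st with
  | nil => rfl
  | cons cn T ih =>
    rw [List.reverse_cons, List.foldl_append]
    simp [ih]

-- monotonicity: dfs only marks nodes visited
theorem pvMono (g : List (List (Int × Int))) (f : Nat) :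
    (∀ v p node, pvCF (pvDfsA g f v p node).1 ≤ pvCF v) ∧
    (∀ L v p, pvCF (pvFoldA g f L v p).1 ≤ pvCF v) := by
  induction f with
  | zero =>
    have hd : ∀ v p node, pvCF (pvDfsA g 0 v p node).1 ≤ pvCF v := by
      intro v p node; rw [pvDfsA]
    refine ⟨hd, ?_⟩
    intro L
    induction L with
    | nil => intro v p; rw [pvFoldA]
    | cons cn T ih =>
      intro v p
      rw [pvFoldA]
      split
      · exact ih v p
      · exact le_trans (ih _ _) (hd v p cn.2)
  | succ f ihf =>
    have hd : ∀ v p node, pvCF (pvDfsA g (f+1) v p node).1 ≤ pvCF v := by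
      intro v p node
      rw [pvDfsA]
      exact le_trans (ihf.2 _ _ _) (pvCF_vset_le v node)
    refine ⟨hd, ?_⟩
    intro L
    induction L with
    | nil => intro v p; rw [pvFoldA]
    | cons cn T ih =>
      intro v p
      rw [pvFoldA]
      split
      · exact ih v p
      · exact le_trans (ih _ _) (hd v p cn.2)

theorem pvDfs_lt (g : List (List (Int × Int))) (f : Nat) (v : List Bool) (p : List Int)
    (node : Int) (h : pvVGet v node = false) :
    pvCF (pvDfsA g (f+1) v p node).1 < pvCF v := by
  rw [pvDfsA]
  exact lt_of_le_of_lt ((pvMono g f).2 _ _ _) (pvCF_vset_lt v node h)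

-- the bridge: the stack loop simulates the recursive dfs
theorem pvBridge (g : List (List (Int × Int))) (f : Nat) :
    (∀ L v p st, pvCF v < f →
      pvStackB g v p (L.map Prod.snd ++ st) =
        (let r := pvFoldA g f L v p; pvStackB g r.1 r.2 st)) ∧
    (∀ v p node st, pvCF v ≤ f → pvVGet v node = false →
      pvStackB g v p (node :: st) =
        (let r := pvDfsA g (f+1) v p node; pvStackB g r.1 r.2 st)) := by
  induction f using Nat.strong_induction_on with
  | _ f ihf =>
  have hQ : ∀ L v p st, pvCF v < f →
      pvStackB g v p (L.map Prod.snd ++ st) =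
        (let r := pvFoldA g f L v p; pvStackB g r.1 r.2 st) := by
    intro L
    induction L with
    | nil => intro v p st _; rw [pvFoldA]; simp
    | cons cn T ihL =>
      intro v p st hcf
      rw [List.map_cons, List.cons_append]
      rw [pvFoldA]
      by_cases hvis : pvVGet v cn.2 = true
      · rw [pvStackB]
        simp only [hvis, if_true]
        exact ihL v p st hcf
      · have hvis' : pvVGet v cn.2 = false := by simpa using hvis
        obtain ⟨f', rfl⟩ : ∃ f', f = f' + 1 := ⟨f - 1, by omega⟩
        have h1 := (ihf f' (by omega)).2 v p cn.2 (T.map Prod.snd ++ st) (by omega) hvis'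
        rw [h1]
        simp only [hvis']
        exact ihL _ _ st (lt_of_lt_of_le (pvDfs_lt g f' v p cn.2 hvis') (by omega))
  refine ⟨hQ, ?_⟩
  intro v p node st hcf hvis
  rw [pvStackB]
  simp only [hvis]
  rw [pvPush_eq]
  rw [pvDfsA]
  exact hQ (pvNbrs g node) (pvVSet v node) (p ++ [node]) st
    (lt_of_lt_of_le (pvCF_vset_lt v node hvis) hcf)

-- ===== VERDICT (by name: the statement is the Claim_ definition above) =====
theorem pvCF_replicate (m : Nat) : pvCF (List.replicate m false) = m := by
  simp [pvCF, List.countP_replicate]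

theorem pvVGet_replicate_false (m : Nat) (i : Int) (h : PySem.Raise.InRange m i) :
    pvVGet (List.replicate m false) i = false := by
  unfold pvVGet PySem.List.pyGetD
  cases hg : PySem.List.pyGet? (List.replicate m false) i with
  | none =>
    exfalso
    exact ((PySem.List.pyGet?_eq_none_iff _ _).mp (by simpa using hg)) (by simpa using h)
  | some b =>
    have hb : b ∈ List.replicate m false := PySem.List.mem_of_pyGet?_eq_some _ hg
    simp [List.eq_of_mem_replicate hb]

theorem dfs_path_spec : Claim_equal_dfs_path := by
  intro mst_edges n start _ hPre
  unfold Spec_dfs_path dfs_path dfs_path_alt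
  have hget : pvVGet (List.replicate n.toNat false) start = false :=
    pvVGet_replicate_false n.toNat start hPre.2
  have h := (pvBridge (pvBuildGraph mst_edges n) n.toNat).2
    (List.replicate n.toNat false) [] start []
    (le_of_eq (pvCF_replicate n.toNat)) hget
  show (pvDfsA (pvBuildGraph mst_edges n) (n.toNat + 1) (List.replicate n.toNat false) [] start).2
        ++ [start] =
      (pvStackB (pvBuildGraph mst_edges n) (List.replicate n.toNat false) [] [start]).2 ++ [start]
  rw [h]
  rw [pvStackB]
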